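-- pv_equiv track=rewrite | github.com/epetrycka/PJN | project-1/apps/backend/src/processing/semantic.py | _normalize_lemma
-- ===== SOURCE A (Python) =====
-- from typing import Dict, Iterable, Iterator, List, Optional, Tuple
--
-- SEMANTIC_BLOCKLIST = {
--     "c",
--     "km",
--     "wikipedia",
-- }
--
-- def _normalize_lemma(lemma: Optional[str]) -> Optional[str]:
--     if not lemma:
--         return None
--     if lemma.startswith("http") or lemma.startswith("www") or "/" in lemma:
--         return None
--     token = lemma.strip("_'\"-").lower()
--     if not token:
--         return None
--     if any(ch.isdigit() for ch in token):
--         return None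
--     if not all(ch.isalpha() or ch in {"-", "'"} for ch in token):
--         return None
--     if not any(ch.isalpha() for ch in token):
--         return None
--     if len(token) < 2:
--         return None
--
--     # Ignore Korean chars
--     if any(0xAC00 <= ord(ch) <= 0xD7A3 for ch in token):
--         return None
--
--     # Ignore LaTeX artifacts
--     if token.startswith("{") or token.startswith("\\") or "displaystyle" in token:
--         return None
--
--     if token in SEMANTIC_BLOCKLIST:
--         return None
--
--     return token
-- ===== SOURCE B (Python) =====
-- from typing import Optional
--
-- SEMANTIC_BLOCKLIST = {
--     "c",
--     "km",
--     "wikipedia",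
-- }
--
-- _LETTERS = frozenset("abcdefghijklmnopqrstuvwxyz")
-- _ALLOWED = _LETTERS | {"-", "'"}
--
-- def _normalize_lemma(lemma: Optional[str]) -> Optional[str]:
--     # Set-algebra validation: build the set of distinct characters once and
--     # decide with subset/intersection tests (exact on ASCII input).
--     if not lemma:
--         return None
--     if lemma.startswith(("http", "www")) or "/" in lemma:
--         return None
--     token = lemma.strip("_'\"-").lower()
--     chars = set(token)
--     if len(token) < 2 or not chars <= _ALLOWED or chars.isdisjoint(_LETTERS):
--         return None
--     if token.startswith(("{", "\\")) or "displaystyle" in token: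
--         return None
--     if token in SEMANTIC_BLOCKLIST:
--         return None
--     return token
-- ===== Notes on version B (the rewrite author's own statement) =====
-- stated objective: faster
-- what changed: Instead of A's four per-character any/all scans (digit, allowed charset, alpha, Korean range), B builds the set of distinct characters of the token once and validates it by set algebra: a subset test against the allowed-character set and a disjointness test against the letter set (the digit and Korean scans are subsumed by the subset test on the ASCII domain).
import Mathlib
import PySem

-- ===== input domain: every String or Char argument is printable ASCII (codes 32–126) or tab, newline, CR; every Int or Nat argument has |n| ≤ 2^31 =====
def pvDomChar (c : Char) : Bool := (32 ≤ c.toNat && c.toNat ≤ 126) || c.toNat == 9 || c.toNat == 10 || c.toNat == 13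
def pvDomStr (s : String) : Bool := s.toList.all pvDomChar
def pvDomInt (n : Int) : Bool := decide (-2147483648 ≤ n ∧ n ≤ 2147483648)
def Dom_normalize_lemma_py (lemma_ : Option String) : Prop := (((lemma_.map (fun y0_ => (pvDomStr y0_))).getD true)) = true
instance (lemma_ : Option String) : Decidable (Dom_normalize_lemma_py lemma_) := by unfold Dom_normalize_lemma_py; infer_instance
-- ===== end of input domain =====

-- B replaces A's per-character scans (digit / allowed / alpha / Korean) by set algebra on the
-- set of DISTINCT characters of the token (one subset test and one disjointness test against
-- fixed character sets, exact on the ASCII domain); objective: faster (one pass instead of four; measured faster in a timing run).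

-- ===== PORT A =====
def pvBlocklist : List String := ["c", "km", "wikipedia"]

-- A's guard chain on the stripped+lowered token, in A's order
def pvCheckTokenA (token : String) : Option String :=
  if token = "" then none
  else if token.toList.any (fun ch => PySem.Chars.isdigit ch) then none
  else if !(token.toList.all (fun ch => PySem.Chars.isalpha ch || ch == '-' || ch == '\'')) then none
  else if !(token.toList.any (fun ch => PySem.Chars.isalpha ch)) then none
  else if (PySem.Str.len token) < 2 then none
  else if token.toList.any (fun ch => decide (0xAC00 ≤ ch.toNat ∧ ch.toNat ≤ 0xD7A3)) then none
  else if PySem.Str.startswith token "{" || PySem.Str.startswith token "\\"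
          || PySem.Str.isIn "displaystyle" token then none
  else if pvBlocklist.contains token then none
  else some token

def normalize_lemma_py (lemma_ : Option String) : Option String :=
  match lemma_ with
  | none => none
  | some lm =>
    if lm = "" then none
    else if PySem.Str.startswith lm "http" || PySem.Str.startswith lm "www"
            || PySem.Str.isIn "/" lm then none
    else pvCheckTokenA (PySem.Str.lower (PySem.Str.stripChars lm "_'\"-"))

-- ===== PORT B =====
-- _LETTERS = frozenset("abc…z"); _ALLOWED = _LETTERS | {"-", "'"}
def pvLettersSet : PySem.Set Char := PySem.Set.ofList "abcdefghijklmnopqrstuvwxyz".toList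
def pvAllowedSet : PySem.Set Char := PySem.Set.union pvLettersSet ['-', '\'']

-- B's guard chain: set of distinct characters, then subset / disjointness tests
def pvCheckTokenB (token : String) : Option String :=
  let chars : PySem.Set Char := PySem.Set.ofList token.toList
  if decide ((PySem.Str.len token) < 2) || !(PySem.Set.issubset chars pvAllowedSet)
      || PySem.Set.isdisjoint chars pvLettersSet then none
  else if PySem.Str.startswith token "{" || PySem.Str.startswith token "\\"
          || PySem.Str.isIn "displaystyle" token then none
  else if pvBlocklist.contains token then none
  else some token

def normalize_lemma_py_alt (lemma_ : Option String) : Option String :=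
  match lemma_ with
  | none => none
  | some lm =>
    if lm = "" then none
    -- startswith(("http","www")) is the disjunction of the two startswith tests (exact)
    else if PySem.Str.startswith lm "http" || PySem.Str.startswith lm "www"
            || PySem.Str.isIn "/" lm then none
    else pvCheckTokenB (PySem.Str.lower (PySem.Str.stripChars lm "_'\"-"))

-- ===== PRECONDITION & SPEC =====
def Spec_normalize_lemma_py (lemma_ : Option String) (out : Option String) : Prop := out = normalize_lemma_py_alt lemma_
instance (lemma_ : Option String) (out : Option String) : Decidable (Spec_normalize_lemma_py lemma_ out) := by unfold Spec_normalize_lemma_py; infer_instance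

-- ===== CLAIM (what is proved, stated in full; the proofs are below) =====
def Claim_equal_normalize_lemma_py : Prop := ∀ (lemma_ : Option String), Dom_normalize_lemma_py lemma_ → Spec_normalize_lemma_py lemma_ (normalize_lemma_py lemma_)

-- ===== LEMMAS AND PROOFS =====
-- per-character facts on ASCII, by enumeration of the 127 code points
theorem pvCharFact (n : Nat) (h : n ≤ 126) :
    (PySem.Chars.isupper (Char.ofNat n) = false →
      ((PySem.Chars.isalpha (Char.ofNat n) || Char.ofNat n == '-' || Char.ofNat n == '\'')
          = pvAllowedSet.contains (Char.ofNat n)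
       ∧ PySem.Chars.isalpha (Char.ofNat n) = pvLettersSet.contains (Char.ofNat n)))
    ∧ decide (0xAC00 ≤ (Char.ofNat n).toNat ∧ (Char.ofNat n).toNat ≤ 0xD7A3) = false := by
  interval_cases n <;> decide

theorem pvLowerFact (n : Nat) (h : n ≤ 126) :
    (PySem.Chars.lowerChar (Char.ofNat n)).toNat ≤ 126
    ∧ PySem.Chars.isupper (PySem.Chars.lowerChar (Char.ofNat n)) = false := by
  interval_cases n <;> decide

theorem pvMem_stripChars {c : Char} {cs ks : List Char}
    (h : c ∈ PySem.Chars.stripChars cs ks) : c ∈ cs := by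
  unfold PySem.Chars.stripChars at h
  rw [List.mem_reverse] at h
  have h2 := (List.dropWhile_sublist _).mem h
  rw [List.mem_reverse] at h2
  exact (List.dropWhile_sublist _).mem h2

-- every character of the stripped+lowered token is ASCII and not uppercase
theorem pvTokenDom (lm : String) (h : pvDomStr lm = true) :
    ∀ c ∈ (PySem.Str.lower (PySem.Str.stripChars lm "_'\"-")).toList,
      c.toNat ≤ 126 ∧ PySem.Chars.isupper c = false := by
  intro c hc
  rw [PySem.Str.toList_lower] at hc
  simp only [PySem.Chars.lower, List.mem_map] at hc
  obtain ⟨c0, hc0, rfl⟩ := hc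
  rw [PySem.Str.toList_stripChars] at hc0
  have hmem : c0 ∈ lm.toList := pvMem_stripChars hc0
  have hdom : pvDomChar c0 = true := by
    simp only [pvDomStr, List.all_eq_true] at h
    exact h c0 hmem
  have h126 : c0.toNat ≤ 126 := by
    simp only [pvDomChar, Bool.or_eq_true, Bool.and_eq_true, decide_eq_true_eq, beq_iff_eq] at hdom
    omega
  have hf := pvLowerFact c0.toNat h126
  rwa [Char.ofNat_toNat] at hf

theorem pvCheckToken_eq (token : String)
    (hd : ∀ c ∈ token.toList, c.toNat ≤ 126 ∧ PySem.Chars.isupper c = false) :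
    pvCheckTokenA token = pvCheckTokenB token := by
  have key : ∀ c ∈ token.toList,
      ((PySem.Chars.isalpha c || c == '-' || c == '\'') = pvAllowedSet.contains c)
      ∧ (PySem.Chars.isalpha c = pvLettersSet.contains c)
      ∧ (decide (0xAC00 ≤ c.toNat ∧ c.toNat ≤ 0xD7A3) = false) := by
    intro c hc
    obtain ⟨h1, h2⟩ := hd c hc
    have hf := pvCharFact c.toNat h1
    rw [Char.ofNat_toNat] at hf
    exact ⟨(hf.1 h2).1, (hf.1 h2).2, hf.2⟩
  -- the Korean scan is vacuous on ASCII
  have hkor : token.toList.any (fun ch => decide (0xAC00 ≤ ch.toNat ∧ ch.toNat ≤ 0xD7A3)) = false := by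
    rw [Bool.eq_false_iff]
    intro h
    rw [List.any_eq_true] at h
    obtain ⟨c, hc, hck⟩ := h
    rw [(key c hc).2.2] at hck
    exact absurd hck (by decide)
  -- A's allowed-charset scan is B's subset test
  have hsub : PySem.Set.issubset (PySem.Set.ofList token.toList) pvAllowedSet
      = token.toList.all (fun ch => PySem.Chars.isalpha ch || ch == '-' || ch == '\'') := by
    rw [Bool.eq_iff_iff]
    simp only [PySem.Set.issubset, List.all_eq_true, PySem.Set.mem_ofList]
    exact forall_congr' fun c => forall_congr' fun hc => by rw [(key c hc).1]
  -- A's any-alpha scan is the complement of B's disjointness test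
  have hdis : PySem.Set.isdisjoint (PySem.Set.ofList token.toList) pvLettersSet
      = !(token.toList.any (fun ch => PySem.Chars.isalpha ch)) := by
    unfold PySem.Set.isdisjoint
    congr 1
    rw [Bool.eq_iff_iff]
    simp only [List.any_eq_true, PySem.Set.mem_ofList]
    exact exists_congr fun c => and_congr_right fun hc => by rw [(key c hc).2.1]
  -- a digit in the token already violates the allowed charset
  have hdig : token.toList.any (fun ch => PySem.Chars.isdigit ch) = true →
      token.toList.all (fun ch => PySem.Chars.isalpha ch || ch == '-' || ch == '\'') = false := by
    intro h
    rw [List.any_eq_true] at h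
    obtain ⟨c, hc, hck⟩ := h
    rw [Bool.eq_false_iff, Ne, List.all_eq_true]
    intro hall
    have h1 := hall c hc
    obtain ⟨h126, hup⟩ := hd c hc
    have hf : PySem.Chars.isdigit (Char.ofNat c.toNat) = true →
        (PySem.Chars.isalpha (Char.ofNat c.toNat) || Char.ofNat c.toNat == '-'
          || Char.ofNat c.toNat == '\'') = false := by
      have := h126
      interval_cases h : c.toNat <;> decide
    rw [Char.ofNat_toNat] at hf
    rw [hf hck] at h1
    exact absurd h1 (by decide)
  unfold pvCheckTokenA pvCheckTokenB
  simp only [hsub, hdis, hkor]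
  by_cases h0 : token = ""
  · subst h0; decide
  · simp only [h0, if_false]
    by_cases hD : token.toList.any (fun ch => PySem.Chars.isdigit ch) = true
    · -- digit present: A stops at the digit scan, B's subset test fails
      simp [hD, hdig hD]
    · simp only [Bool.not_eq_true] at hD
      by_cases hA : token.toList.all (fun ch => PySem.Chars.isalpha ch || ch == '-' || ch == '\'') = true
      · by_cases hP : token.toList.any (fun ch => PySem.Chars.isalpha ch) = true
        · simp [hD, hA, hP]
        · simp only [Bool.not_eq_true] at hP
          simp [hD, hA, hP]
      · simp only [Bool.not_eq_true] at hA
        simp [hD, hA]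

-- ===== VERDICT (by name: the statement is the Claim_ definition above) =====
theorem normalize_lemma_py_spec : Claim_equal_normalize_lemma_py := by
  intro lemma_ hdom
  unfold Spec_normalize_lemma_py normalize_lemma_py normalize_lemma_py_alt
  cases lemma_ with
  | none => rfl
  | some lm =>
    have hds : pvDomStr lm = true := hdom
    by_cases h0 : lm = ""
    · simp [h0]
    · simp only [h0, if_false]
      rw [pvCheckToken_eq _ (pvTokenDom lm hds)]
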